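-- pv_equiv track=rewrite | github.com/Zenidog8/IC-1803-taller-de-programacion | nReinas.py | obtener_hijos
-- ===== SOURCE A (Python) =====
-- def matriz_nula(n):
--     return [[0]*n for i in range(n)]
--
-- def copiarMatriz(matriz):
--     n = len(matriz)
--     matrizNueva = matriz_nula(n)
--     for i in range(n):
--         for j in range(n):
--             matrizNueva[i][j] = matriz[i][j]
--     return matrizNueva
--
-- def es_valida(matriz, fila, col):
--     n = len(matriz)
--     # Revisa la columna
--     for i in range(fila):
--         if matriz[i][col] == 1:
--             return False
--
--     # Revisa la diagonal /
--     j = col + 1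
--     for i in range(fila - 1, -1, -1):
--         if j < n:
--             if matriz[i][j] == 1:
--                 return False
--             j += 1
--
--     # Revisa la diagonal \
--     j = col - 1
--     for i in range(fila - 1, -1, -1):
--         if j >= 0:
--             if matriz[i][j] == 1:
--                 return False
--             j -= 1
--
--     return True
--
-- def obtener_hijos(matriz):
--     # Busca la prox fila sin reinas
--     n = len(matriz)
--     fila = -1
--     for i in range(n):
--         if 1 not in matriz[i]:
--             fila = i
--             break
--
--     if fila == -1:
--         return []  # No tiene hijos (es una posible solucion)
--
--     hijos = []
--     for col in range(n-1, -1, -1): # Recorre las columnas de derecha a izquierda ya que la pilas es FILO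
--         if es_valida(matriz, fila, col):
--             nMatriz = copiarMatriz(matriz)
--             nMatriz[fila][col] = 1
--             hijos.append(nMatriz)
--     return hijos
-- ===== SOURCE B (Python) =====
-- def obtener_hijos(matriz):
--     n = len(matriz)
--     # first row without a queen
--     fila = None
--     for i, row in enumerate(matriz):
--         if 1 not in row:
--             fila = i
--             break
--     if fila is None:
--         return []  # no children (possible solution)
--
--     # one scan of the rows above collects every attacked column and diagonal
--     cols, anti, diag = set(), set(), set()
--     for i, row in enumerate(matriz[:fila]):
--         for j, v in enumerate(row):
--             if v == 1:
--                 cols.add(j)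
--                 anti.add(i + j)
--                 diag.add(i - j)
--
--     def child(col):
--         nueva = [list(r) for r in matriz]
--         nueva[fila][col] = 1
--         return nueva
--
--     return [child(col) for col in range(n - 1, -1, -1)
--             if col not in cols and fila + col not in anti and fila - col not in diag]
-- ===== Notes on version B (the rewrite author's own statement) =====
-- stated objective: faster
-- what changed: B replaces A's per-column es_valida (three directional walks with mutable diagonal counters) and its index-by-index n-by-n copy loop by one pass over the rows above the free row that collects attacked columns and both diagonals into three sets, then filters columns right-to-left by set membership and copies the board by row slicing.
-- outside the precondition, e.g. on obtener_hijos([[0, 0]]): A returns [[[1]]], B returns [[[1, 0]]]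
import Mathlib
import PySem

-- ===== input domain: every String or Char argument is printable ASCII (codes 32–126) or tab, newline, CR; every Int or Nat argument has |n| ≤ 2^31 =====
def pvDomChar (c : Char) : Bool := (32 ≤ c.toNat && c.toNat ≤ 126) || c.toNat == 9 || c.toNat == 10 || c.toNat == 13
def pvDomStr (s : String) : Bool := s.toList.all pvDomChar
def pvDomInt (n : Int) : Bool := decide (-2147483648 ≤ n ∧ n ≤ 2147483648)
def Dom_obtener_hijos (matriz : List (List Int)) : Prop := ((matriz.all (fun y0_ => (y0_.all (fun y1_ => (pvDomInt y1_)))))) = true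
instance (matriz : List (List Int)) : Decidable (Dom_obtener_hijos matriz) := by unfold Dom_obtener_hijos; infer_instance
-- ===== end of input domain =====

-- B replaces A's three per-column directional scans (es_valida) and its index-by-index
-- n×n copy with one pass over the rows above that collects attacked columns/diagonals
-- into three sets, then filters columns by set membership (measured faster in a timing run).

-- ===== PORT A =====
def matriz_nula (n : Nat) : List (List Int) :=
  (List.range n).map (fun _ => List.replicate n (0 : Int))

-- matriz[i][j] is in range on every input admitted by Pre_ (square matrix); getD is exact there
def copiarMatriz (matriz : List (List Int)) : List (List Int) :=
  let n := matriz.length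
  (List.range n).foldl (fun acc i =>
    (List.range n).foldl (fun acc j =>
      acc.set i ((acc.getD i []).set j ((matriz.getD i []).getD j 0))) acc)
    (matriz_nula n)

def es_valida (matriz : List (List Int)) (fila : Nat) (col : Nat) : Bool :=
  let n := matriz.length
  if (List.range fila).any (fun i => (matriz.getD i []).getD col 0 == 1) then false
  else if (((List.range fila).reverse).foldl
      (fun (st : Nat × Bool) i =>
        if st.1 < n then (st.1 + 1, st.2 || ((matriz.getD i []).getD st.1 0 == 1)) else st)
      (col + 1, false)).2 then false
  else if (((List.range fila).reverse).foldl
      (fun (st : Int × Bool) i =>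
        if 0 ≤ st.1 then (st.1 - 1, st.2 || ((matriz.getD i []).getD st.1.toNat 0 == 1)) else st)
      ((col : Int) - 1, false)).2 then false
  else true

def obtener_hijos (matriz : List (List Int)) : List (List (List Int)) :=
  let n := matriz.length
  let fila : Int :=
    match (List.range n).find? (fun i => !((matriz.getD i []).contains (1 : Int))) with
    | some i => (i : Int)
    | none => -1
  if fila == -1 then []
  else
    ((List.range n).reverse).foldl
      (fun hijos col =>
        if es_valida matriz fila.toNat col then
          let nMatriz := copiarMatriz matriz
          hijos ++ [nMatriz.set fila.toNat ((nMatriz.getD fila.toNat []).set col (1 : Int))]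
        else hijos) []

-- ===== PORT B =====
-- one scan of the rows above the free row: three sets of attacked columns / diagonals
def scanSets (rows : List (List Int)) : PySem.Set Int × PySem.Set Int × PySem.Set Int :=
  (PySem.List.enumerate rows).foldl
    (fun st p =>
      (PySem.List.enumerate p.2).foldl
        (fun (st : PySem.Set Int × PySem.Set Int × PySem.Set Int) q =>
          if q.2 == (1 : Int) then
            (PySem.Set.add st.1 q.1, PySem.Set.add st.2.1 (p.1 + q.1),
             PySem.Set.add st.2.2 (p.1 - q.1))
          else st) st)
    ([], [], [])

def obtener_hijos_alt (matriz : List (List Int)) : List (List (List Int)) :=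
  let n := matriz.length
  match matriz.findIdx? (fun row => !(row.contains (1 : Int))) with
  | none => []
  | some fila =>
    let sets := scanSets (matriz.take fila)
    ((List.range n).reverse).filterMap (fun (col : Nat) =>
      if !(PySem.Set.contains sets.1 (col : Int))
          && !(PySem.Set.contains sets.2.1 ((fila : Int) + (col : Int)))
          && !(PySem.Set.contains sets.2.2 ((fila : Int) - (col : Int))) then
        some (matriz.set fila ((matriz.getD fila []).set col (1 : Int)))
      else none)

-- ===== PRECONDITION & SPEC =====
-- Pre_ excludes non-square matrices in which some row lacks a 1: there A's fixed-n indexing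
-- raises IndexError on short rows, and its n×n copy silently truncates long rows — an
-- artefact of its copy loop; B copies rows as they are. (Matrices whose rows all contain
-- a 1 are kept: both programs return an empty child list without indexing.)
def Pre_obtener_hijos (matriz : List (List Int)) : Prop :=
  (∀ row ∈ matriz, row.length = matriz.length) ∨ (∀ row ∈ matriz, (1 : Int) ∈ row)
instance (matriz : List (List Int)) : Decidable (Pre_obtener_hijos matriz) := by
  unfold Pre_obtener_hijos; infer_instance

def pvWitness_obtener_hijos : List (List Int) := [[0, 1], [0, 0]]

def Spec_obtener_hijos (matriz : List (List Int)) (out : List (List (List Int))) : Prop := out = obtener_hijos_alt matriz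
instance (matriz : List (List Int)) (out : List (List (List Int))) : Decidable (Spec_obtener_hijos matriz out) := by unfold Spec_obtener_hijos; infer_instance

-- ===== CLAIM (what is proved, stated in full; the proofs are below) =====
def Claim_equal_obtener_hijos : Prop := ∀ (matriz : List (List Int)), Dom_obtener_hijos matriz → Pre_obtener_hijos matriz → Spec_obtener_hijos matriz (obtener_hijos matriz)

-- ===== LEMMAS AND PROOFS =====

-- the three "attacked" predicates, stated over total indexing
def ColHit (m : List (List Int)) (fila col : Nat) : Prop :=
  ∃ i < fila, ∃ j < m.length, (m.getD i []).getD j 0 = 1 ∧ (j : Int) = (col : Int)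
def AntiHit (m : List (List Int)) (fila col : Nat) : Prop :=
  ∃ i < fila, ∃ j < m.length, (m.getD i []).getD j 0 = 1 ∧ (i : Int) + (j : Int) = (fila : Int) + (col : Int)
def DiagHit (m : List (List Int)) (fila col : Nat) : Prop :=
  ∃ i < fila, ∃ j < m.length, (m.getD i []).getD j 0 = 1 ∧ (i : Int) - (j : Int) = (fila : Int) - (col : Int)



theorem findRange (p : List Int → Bool) (l : List (List Int)) :
    (List.range l.length).find? (fun i => p (l.getD i [])) = l.findIdx? p := by
  induction l with
  | nil => simp
  | cons a t ih =>
    simp only [List.length_cons, List.range_succ_eq_map, List.find?_cons]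
    simp only [List.getD_eq_getElem?_getD, List.getElem?_cons_zero, Option.getD_some]
    cases hp : p a with
    | true => simp [List.findIdx?_cons, hp]
    | false =>
      simp only [List.findIdx?_cons, hp]
      rw [List.find?_map]
      rw [← ih]
      simp [Function.comp_def, List.getD_eq_getElem?_getD, Nat.succ_eq_add_one]

theorem filterMap_if {α β : Type} (l : List α) (p : α → Bool) (f : α → β) :
    l.filterMap (fun x => if p x then some (f x) else none) = (l.filter p).map f := by
  induction l with
  | nil => rfl
  | cons a t ih =>
    by_cases h : p a <;> simp [h, ih]

theorem set_getD_self {α : Type} (l : List α) (i : Nat) (d : α) :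
    l.set i (l.getD i d) = l := by
  apply List.ext_getElem (by simp)
  intro m h1 h2
  rw [List.getElem_set]
  split
  · next h => subst h; exact (List.getD_eq_getElem l d h2).symm ▸ rfl
  · rfl

theorem getD_set_self {α : Type} (l : List α) (i : Nat) (v d : α) :
    (l.set i v).getD i d = if i < l.length then v else d := by
  rw [List.getD_eq_getElem?_getD, List.getElem?_set]
  split
  · split <;> simp
  · simp at *

theorem getD_set_ne' {α : Type} (l : List α) {i m : Nat} (v d : α) (h : i ≠ m) :
    (l.set i v).getD m d = l.getD m d := by
  rw [List.getD_eq_getElem?_getD, List.getD_eq_getElem?_getD, List.getElem?_set, if_neg h]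

theorem inner_push (v : Nat → Int) (js : List Nat) :
    ∀ (i : Nat) (acc : List (List Int)),
    js.foldl (fun acc j => acc.set i ((acc.getD i []).set j (v j))) acc
      = acc.set i (js.foldl (fun r j => r.set j (v j)) (acc.getD i [])) := by
  induction js with
  | nil => intro i acc; exact (set_getD_self acc i []).symm
  | cons j js ih =>
    intro i acc
    simp only [List.foldl_cons]
    rw [ih, List.set_set, getD_set_self]
    split
    · rfl
    · next h =>
      rw [List.getD_eq_getElem?_getD, List.getElem?_eq_none (by omega)]
      simp

theorem foldl_set_indep {α : Type} (v : Nat → α) (js : List Nat) :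
    ∀ (r : List α),
    (js.foldl (fun r j => r.set j (v j)) r).length = r.length ∧
    ∀ m, m < r.length →
      (js.foldl (fun r j => r.set j (v j)) r)[m]? = if m ∈ js then some (v m) else r[m]? := by
  induction js with
  | nil => intro r; simp
  | cons j js ih =>
    intro r
    simp only [List.foldl_cons]
    obtain ⟨hl, he⟩ := ih (r.set j (v j))
    refine ⟨by simp [hl], ?_⟩
    intro m hm
    rw [he m (by simp [hm])]
    by_cases hmem : m ∈ js
    · simp [hmem]
    · simp only [hmem, if_false, List.getElem?_set]
      by_cases hjm : j = m
      · subst hjm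
        simp [hm, List.mem_cons]
      · simp [List.mem_cons, hjm, Ne.symm hjm, hmem]

theorem foldl_set_dep {α : Type} (F : Nat → α → α) (d : α) (js : List Nat) :
    ∀ (acc : List α), js.Nodup →
    (js.foldl (fun acc i => acc.set i (F i (acc.getD i d))) acc).length = acc.length ∧
    ∀ m, m < acc.length →
      (js.foldl (fun acc i => acc.set i (F i (acc.getD i d))) acc)[m]?
        = if m ∈ js then some (F m (acc.getD m d)) else acc[m]? := by
  induction js with
  | nil => intro acc _; simp
  | cons j js ih =>
    intro acc hnd
    obtain ⟨hj, hnd'⟩ := List.nodup_cons.mp hnd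
    simp only [List.foldl_cons]
    set acc' := acc.set j (F j (acc.getD j d)) with hacc'
    obtain ⟨hl, he⟩ := ih acc' hnd'
    refine ⟨by rw [hl, hacc', List.length_set], ?_⟩
    intro m hm
    rw [he m (by rw [hacc', List.length_set]; exact hm)]
    by_cases hmem : m ∈ js
    · have hjm : j ≠ m := fun h => hj (h ▸ hmem)
      rw [if_pos hmem, if_pos (List.mem_cons_of_mem _ hmem), hacc',
        getD_set_ne' _ _ _ hjm]
    · simp only [hmem, if_false, hacc', List.getElem?_set]
      by_cases hjm : j = m
      · subst hjm
        simp [hm, List.mem_cons]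
      · simp [List.mem_cons, hjm, Ne.symm hjm, hmem]

theorem rowcopy (w : List Int) (n : Nat) (hw : w.length = n) :
    (List.range n).foldl (fun r j => r.set j (w.getD j 0)) (List.replicate n (0 : Int)) = w := by
  obtain ⟨hl, he⟩ := foldl_set_indep (fun j => w.getD j 0) (List.range n) (List.replicate n (0 : Int))
  apply List.ext_getElem?
  intro m
  by_cases hm : m < n
  · rw [he m (by simp [hm])]
    simp only [List.mem_range, hm, if_pos]
    rw [List.getD_eq_getElem w 0 (hw ▸ hm), List.getElem?_eq_getElem (hw ▸ hm)]
  · rw [List.getElem?_eq_none (by omega : w.length ≤ m),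
      List.getElem?_eq_none (by rw [hl, List.length_replicate]; omega)]

theorem copiar_eq (m : List (List Int)) (hsq : ∀ row ∈ m, row.length = m.length) :
    copiarMatriz m = m := by
  have hsq' : ∀ i, i < m.length → (m.getD i []).length = m.length := by
    intro i hi
    rw [List.getD_eq_getElem _ _ hi]
    exact hsq _ (List.getElem_mem hi)
  show (List.range m.length).foldl (fun acc i =>
    (List.range m.length).foldl (fun acc j =>
      acc.set i ((acc.getD i []).set j ((m.getD i []).getD j 0))) acc)
    (matriz_nula m.length) = m
  have hip : ∀ (acc : List (List Int)) (i : Nat),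
      (List.range m.length).foldl (fun acc j =>
        acc.set i ((acc.getD i []).set j ((m.getD i []).getD j 0))) acc
      = acc.set i ((List.range m.length).foldl
          (fun r j => r.set j ((m.getD i []).getD j 0)) (acc.getD i [])) := by
    intro acc i; exact inner_push (fun j => (m.getD i []).getD j 0) _ i acc
  simp only [hip]
  obtain ⟨hl, he⟩ := foldl_set_dep
    (fun i r => (List.range m.length).foldl (fun r j => r.set j ((m.getD i []).getD j 0)) r)
    ([] : List Int) (List.range m.length) (matriz_nula m.length) (List.nodup_range)
  have hnula : (matriz_nula m.length).length = m.length := by simp [matriz_nula]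
  apply List.ext_getElem?
  intro k
  by_cases hk : k < m.length
  · rw [he k (by rw [hnula]; exact hk)]
    simp only [List.mem_range, hk, if_pos]
    have hnk : (matriz_nula m.length).getD k [] = List.replicate m.length (0 : Int) := by
      rw [List.getD_eq_getElem _ _ (by rw [hnula]; exact hk)]
      simp [matriz_nula]
    rw [hnk, rowcopy _ _ (hsq' k hk), List.getD_eq_getElem _ _ hk,
      List.getElem?_eq_getElem hk]
  · rw [List.getElem?_eq_none (by omega : m.length ≤ k),
      List.getElem?_eq_none (by rw [hl, hnula]; omega)]

theorem d1_fold (g : Nat → Nat → Bool) (n : Nat) (l : List Nat) :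
    ∀ (j0 : Nat) (b : Bool),
    ((l.foldl (fun (st : Nat × Bool) i =>
        if st.1 < n then (st.1 + 1, st.2 || g i st.1) else st) (j0, b)).2)
      = (b || (l.zip (List.range' j0 (n - j0))).any (fun p => g p.1 p.2)) := by
  induction l with
  | nil => intro j0 b; simp
  | cons i l ih =>
    intro j0 b
    simp only [List.foldl_cons]
    by_cases hj : j0 < n
    · rw [if_pos hj, ih]
      have hn : n - j0 = (n - (j0 + 1)) + 1 := by omega
      rw [hn, List.range'_succ, List.zip_cons_cons, List.any_cons]
      simp [Bool.or_assoc]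
    · rw [if_neg hj, ih]
      have hn : n - j0 = 0 := by omega
      rw [hn]
      simp

theorem d2_fold (g : Nat → Nat → Bool) (l : List Nat) :
    ∀ (c : Nat) (b : Bool),
    ((l.foldl (fun (st : Int × Bool) i =>
        if 0 ≤ st.1 then (st.1 - 1, st.2 || g i st.1.toNat) else st) ((c : Int) - 1, b)).2)
      = (b || (l.zip ((List.range c).reverse)).any (fun p => g p.1 p.2)) := by
  induction l with
  | nil => intro c b; simp
  | cons i l ih =>
    intro c b
    simp only [List.foldl_cons]
    cases c with
    | zero =>
      have := ih 0 b
      simp only [List.range_zero, List.reverse_nil, List.zip_nil_right, List.any_nil,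
        Bool.or_false] at this ⊢
      rw [if_neg (by norm_num), this]
    | succ c' =>
      have h0 : ((c' + 1 : Nat) : Int) - 1 = (c' : Int) := by push_cast; ring
      rw [h0, if_pos (by positivity)]
      have ht : ((c' : Int)).toNat = c' := Int.toNat_natCast c'
      rw [ht, ih c' (b || g i c')]
      have hr : (List.range (c' + 1)).reverse = c' :: (List.range c').reverse := by
        rw [List.range_succ, List.reverse_append]
        simp
      rw [hr, List.zip_cons_cons, List.any_cons]
      simp [Bool.or_assoc]

theorem zip_any_iff (l1 l2 : List Nat) (q : Nat → Nat → Bool) :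
    (l1.zip l2).any (fun p => q p.1 p.2) = true ↔
      ∃ k, ∃ (h1 : k < l1.length) (h2 : k < l2.length), q l1[k] l2[k] = true := by
  rw [List.any_eq_true]
  constructor
  · rintro ⟨x, hx, hq⟩
    obtain ⟨k, hk, hke⟩ := List.mem_iff_getElem.mp hx
    have hk' := hk
    rw [List.length_zip] at hk'
    refine ⟨k, by omega, by omega, ?_⟩
    rw [List.getElem_zip] at hke
    rw [← hke] at hq
    exact hq
  · rintro ⟨k, h1, h2, hq⟩
    refine ⟨(l1[k], l2[k]), ?_, hq⟩
    rw [List.mem_iff_getElem]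
    exact ⟨k, by rw [List.length_zip]; omega, by rw [List.getElem_zip]⟩

theorem es_valida_iff (m : List (List Int)) (fila col : Nat) (hcol : col < m.length) :
    es_valida m fila col = true ↔
      ¬ ColHit m fila col ∧ ¬ AntiHit m fila col ∧ ¬ DiagHit m fila col := by
  have hrev : ∀ k, (h : k < (List.range fila).reverse.length) →
      ((List.range fila).reverse)[k] = fila - 1 - k := by
    intro k h
    rw [List.getElem_reverse, List.getElem_range]
    simp
  have hC : ((List.range fila).any (fun i => (m.getD i []).getD col 0 == 1) = true)
      ↔ ColHit m fila col := by
    rw [List.any_eq_true]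
    constructor
    · rintro ⟨i, hi, hq⟩
      rw [List.mem_range] at hi
      rw [beq_iff_eq] at hq
      exact ⟨i, hi, col, hcol, hq, rfl⟩
    · rintro ⟨i, hi, j, hj, hq, hcast⟩
      have : j = col := by omega
      subst this
      exact ⟨i, List.mem_range.mpr hi, beq_iff_eq.mpr hq⟩
  have hD1 : ((((List.range fila).reverse).foldl
      (fun (st : Nat × Bool) i =>
        if st.1 < m.length then (st.1 + 1, st.2 || ((m.getD i []).getD st.1 0 == 1)) else st)
      (col + 1, false)).2 = true) ↔ AntiHit m fila col := by
    rw [d1_fold (fun i j => (m.getD i []).getD j 0 == 1) m.length _ (col + 1) false]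
    rw [Bool.false_or, zip_any_iff _ _ (fun i j => (m.getD i []).getD j 0 == 1)]
    constructor
    · rintro ⟨k, h1, h2, hq⟩
      rw [List.length_reverse, List.length_range] at h1
      rw [List.length_range'] at h2
      rw [hrev k (by simpa using h1), List.getElem_range'] at hq
      rw [beq_iff_eq] at hq
      refine ⟨fila - 1 - k, by omega, col + 1 + 1 * k, by omega, ?_, by push_cast; omega⟩
      exact hq
    · rintro ⟨i, hi, j, hj, hq, hcast⟩
      have hij : i + j = fila + col := by omega
      refine ⟨fila - 1 - i, ?_, ?_, ?_⟩
      · rw [List.length_reverse, List.length_range]; omega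
      · rw [List.length_range']; omega
      · rw [hrev _ (by rw [List.length_reverse, List.length_range]; omega), List.getElem_range']
        rw [beq_iff_eq]
        have e1 : fila - 1 - (fila - 1 - i) = i := by omega
        have e2 : col + 1 + 1 * (fila - 1 - i) = j := by omega
        rw [e1, e2]
        exact hq
  have hD2 : ((((List.range fila).reverse).foldl
      (fun (st : Int × Bool) i =>
        if 0 ≤ st.1 then (st.1 - 1, st.2 || ((m.getD i []).getD st.1.toNat 0 == 1)) else st)
      ((col : Int) - 1, false)).2 = true) ↔ DiagHit m fila col := by
    rw [d2_fold (fun i j => (m.getD i []).getD j 0 == 1) _ col false]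
    rw [Bool.false_or, zip_any_iff _ _ (fun i j => (m.getD i []).getD j 0 == 1)]
    constructor
    · rintro ⟨k, h1, h2, hq⟩
      rw [List.length_reverse, List.length_range] at h1
      rw [List.length_reverse, List.length_range] at h2
      rw [hrev k (by simpa using h1)] at hq
      have hc2 : ((List.range col).reverse)[k]'(by simpa using h2) = col - 1 - k := by
        rw [List.getElem_reverse, List.getElem_range]; simp
      rw [hc2, beq_iff_eq] at hq
      exact ⟨fila - 1 - k, by omega, col - 1 - k, by omega, hq, by omega⟩
    · rintro ⟨i, hi, j, hj, hq, hcast⟩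
      have hjc : j < col := by omega
      refine ⟨fila - 1 - i, ?_, ?_, ?_⟩
      · rw [List.length_reverse, List.length_range]; omega
      · rw [List.length_reverse, List.length_range]; omega
      · rw [hrev _ (by rw [List.length_reverse, List.length_range]; omega)]
        have hc2 : ((List.range col).reverse)[fila - 1 - i]'(by rw [List.length_reverse, List.length_range]; omega) = col - 1 - (fila - 1 - i) := by
          rw [List.getElem_reverse, List.getElem_range]; simp
        rw [hc2, beq_iff_eq]
        have e1 : fila - 1 - (fila - 1 - i) = i := by omega
        have e2 : col - 1 - (fila - 1 - i) = j := by omega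
        rw [e1, e2]
        exact hq
  simp only [es_valida]
  split_ifs with h1 h2 h3
  · simp only [false_iff]
    rintro ⟨hc, -, -⟩
    exact hc (hC.mp h1)
  · simp only [false_iff]
    rintro ⟨-, ha, -⟩
    exact ha (hD1.mp h2)
  · simp only [false_iff]
    rintro ⟨-, -, hd⟩
    exact hd (hD2.mp h3)
  · simp only [true_iff]
    exact ⟨fun hc => h1 (hC.mpr hc), fun ha => h2 (hD1.mpr ha), fun hd => h3 (hD2.mpr hd)⟩

theorem innerTriple (iv : Int) (row : List Int) :
    ∀ (s : Int) (st : PySem.Set Int × PySem.Set Int × PySem.Set Int),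
    (PySem.List.enumerate row s).foldl
      (fun (st : PySem.Set Int × PySem.Set Int × PySem.Set Int) q =>
        if q.2 == (1 : Int) then
          (PySem.Set.add st.1 q.1, PySem.Set.add st.2.1 (iv + q.1),
           PySem.Set.add st.2.2 (iv - q.1))
        else st) st
    = ((PySem.List.enumerate row s).foldl
         (fun c q => if q.2 == (1 : Int) then PySem.Set.add c q.1 else c) st.1,
       (PySem.List.enumerate row s).foldl
         (fun c q => if q.2 == (1 : Int) then PySem.Set.add c (iv + q.1) else c) st.2.1,
       (PySem.List.enumerate row s).foldl
         (fun c q => if q.2 == (1 : Int) then PySem.Set.add c (iv - q.1) else c) st.2.2) := by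
  induction row with
  | nil => intro s st; simp [PySem.List.enumerate_nil]
  | cons v row ih =>
    intro s st
    simp only [PySem.List.enumerate_cons, List.foldl_cons]
    by_cases hv : (v == (1 : Int)) = true
    · simp only [hv, if_true]
      exact ih (s + 1) _
    · simp only [hv, Bool.false_eq_true, if_false]
      exact ih (s + 1) st

theorem outerTriple (rows : List (List Int)) :
    ∀ (s : Int) (st : PySem.Set Int × PySem.Set Int × PySem.Set Int),
    (PySem.List.enumerate rows s).foldl
      (fun st p =>
        (PySem.List.enumerate p.2).foldl
          (fun (st : PySem.Set Int × PySem.Set Int × PySem.Set Int) q =>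
            if q.2 == (1 : Int) then
              (PySem.Set.add st.1 q.1, PySem.Set.add st.2.1 (p.1 + q.1),
               PySem.Set.add st.2.2 (p.1 - q.1))
            else st) st) st
    = ((PySem.List.enumerate rows s).foldl
         (fun c p => (PySem.List.enumerate p.2).foldl
            (fun c q => if q.2 == (1 : Int) then PySem.Set.add c q.1 else c) c) st.1,
       (PySem.List.enumerate rows s).foldl
         (fun c p => (PySem.List.enumerate p.2).foldl
            (fun c q => if q.2 == (1 : Int) then PySem.Set.add c (p.1 + q.1) else c) c) st.2.1,
       (PySem.List.enumerate rows s).foldl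
         (fun c p => (PySem.List.enumerate p.2).foldl
            (fun c q => if q.2 == (1 : Int) then PySem.Set.add c (p.1 - q.1) else c) c) st.2.2) := by
  induction rows with
  | nil => intro s st; simp [PySem.List.enumerate_nil]
  | cons row rows ih =>
    intro s st
    simp only [PySem.List.enumerate_cons, List.foldl_cons]
    rw [innerTriple s row _ st]
    exact ih (s + 1) _

theorem consSplit (h : Int → Int) (v : Int) (row : List Int) (s x : Int) :
    (∃ k < (v :: row).length, (v :: row).getD k 0 = 1 ∧ x = h (s + (k : Int))) ↔
      ((v = 1 ∧ x = h s) ∨ ∃ k < row.length, row.getD k 0 = 1 ∧ x = h (s + 1 + (k : Int))) := by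
  constructor
  · rintro ⟨k, hk, hc, hx⟩
    cases k with
    | zero =>
      left
      refine ⟨by simpa using hc, ?_⟩
      simpa using hx
    | succ k =>
      right
      refine ⟨k, by simpa using hk, by simpa using hc, ?_⟩
      have e : s + ((k + 1 : Nat) : Int) = s + 1 + (k : Int) := by push_cast; ring
      rw [← e]; exact hx
  · rintro (⟨hv, hx⟩ | ⟨k, hk, hc, hx⟩)
    · exact ⟨0, by simp, by simpa using hv, by simpa using hx⟩
    · refine ⟨k + 1, by simpa using hk, by simpa using hc, ?_⟩
      have e : s + ((k + 1 : Nat) : Int) = s + 1 + (k : Int) := by push_cast; ring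
      rw [e]; exact hx

theorem memAddFold (h : Int → Int) (row : List Int) :
    ∀ (s : Int) (c : PySem.Set Int) (x : Int),
    (x ∈ (PySem.List.enumerate row s).foldl
        (fun c q => if q.2 == (1 : Int) then PySem.Set.add c (h q.1) else c) c) ↔
      x ∈ c ∨ ∃ k < row.length, row.getD k 0 = 1 ∧ x = h (s + (k : Int)) := by
  induction row with
  | nil => intro s c x; simp [PySem.List.enumerate_nil]
  | cons v row ih =>
    intro s c x
    rw [consSplit h v row s x]
    simp only [PySem.List.enumerate_cons, List.foldl_cons]
    by_cases hv : (v == (1 : Int)) = true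
    · simp only [hv, if_true]
      rw [ih (s + 1) _ x, PySem.Set.mem_add]
      rw [beq_iff_eq] at hv
      tauto
    · simp only [hv, Bool.false_eq_true, if_false]
      rw [ih (s + 1) c x]
      rw [beq_iff_eq] at hv
      tauto

theorem consSplitRows (H : Int → Int → Int) (row : List Int) (rows : List (List Int)) (s x : Int) :
    (∃ a < (row :: rows).length, ∃ k < ((row :: rows).getD a []).length,
        ((row :: rows).getD a []).getD k 0 = 1 ∧ x = H (s + (a : Int)) (k : Int)) ↔
      ((∃ k < row.length, row.getD k 0 = 1 ∧ x = H s (k : Int)) ∨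
        ∃ a < rows.length, ∃ k < (rows.getD a []).length,
          (rows.getD a []).getD k 0 = 1 ∧ x = H (s + 1 + (a : Int)) (k : Int)) := by
  constructor
  · rintro ⟨a, ha, k, hk, hc, hx⟩
    cases a with
    | zero =>
      left
      exact ⟨k, by simpa using hk, by simpa using hc, by simpa using hx⟩
    | succ a =>
      right
      refine ⟨a, by simpa using ha, k, by simpa using hk, by simpa using hc, ?_⟩
      have e : s + ((a + 1 : Nat) : Int) = s + 1 + (a : Int) := by push_cast; ring
      rw [← e]
      simpa using hx
  · rintro (⟨k, hk, hc, hx⟩ | ⟨a, ha, k, hk, hc, hx⟩)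
    · exact ⟨0, by simp, k, by simpa using hk, by simpa using hc, by simpa using hx⟩
    · refine ⟨a + 1, by simpa using ha, k, by simpa using hk, by simpa using hc, ?_⟩
      have e : s + ((a + 1 : Nat) : Int) = s + 1 + (a : Int) := by push_cast; ring
      rw [e]
      simpa using hx

theorem memOuterFold (H : Int → Int → Int) (rows : List (List Int)) :
    ∀ (s : Int) (c : PySem.Set Int) (x : Int),
    (x ∈ (PySem.List.enumerate rows s).foldl
        (fun c p => (PySem.List.enumerate p.2).foldl
          (fun c q => if q.2 == (1 : Int) then PySem.Set.add c (H p.1 q.1) else c) c) c) ↔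
      x ∈ c ∨ ∃ a < rows.length, ∃ k < (rows.getD a []).length,
        (rows.getD a []).getD k 0 = 1 ∧ x = H (s + (a : Int)) (k : Int) := by
  induction rows with
  | nil => intro s c x; simp [PySem.List.enumerate_nil]
  | cons row rows ih =>
    intro s c x
    rw [consSplitRows H row rows s x]
    simp only [PySem.List.enumerate_cons, List.foldl_cons]
    rw [ih (s + 1) _ x]
    have hin := memAddFold (H s) row 0 c x
    simp only [zero_add] at hin
    rw [hin]
    rw [or_assoc]

theorem take_getD (m : List (List Int)) (fila a : Nat) (ha : a < fila) (ha2 : a < m.length) :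
    (m.take fila).getD a [] = m.getD a [] := by
  rw [List.getD_eq_getElem _ _ (by simp [List.length_take]; omega),
      List.getD_eq_getElem _ _ ha2, List.getElem_take]

theorem mem_scanSets (m : List (List Int)) (fila : Nat) (hfila : fila ≤ m.length) (x : Int) :
    (x ∈ (scanSets (m.take fila)).1 ↔
        ∃ a < fila, ∃ k < (m.getD a []).length, (m.getD a []).getD k 0 = 1 ∧ x = (k : Int)) ∧
    (x ∈ (scanSets (m.take fila)).2.1 ↔
        ∃ a < fila, ∃ k < (m.getD a []).length, (m.getD a []).getD k 0 = 1 ∧ x = (a : Int) + (k : Int)) ∧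
    (x ∈ (scanSets (m.take fila)).2.2 ↔
        ∃ a < fila, ∃ k < (m.getD a []).length, (m.getD a []).getD k 0 = 1 ∧ x = (a : Int) - (k : Int)) := by
  have hlen : (m.take fila).length = fila := by simp [List.length_take]; omega
  have conv : ∀ (H : Int → Int → Int),
      ((∃ a < (m.take fila).length, ∃ k < ((m.take fila).getD a []).length,
          ((m.take fila).getD a []).getD k 0 = 1 ∧ x = H ((0 : Int) + (a : Int)) (k : Int)) ↔
        (∃ a < fila, ∃ k < (m.getD a []).length, (m.getD a []).getD k 0 = 1 ∧ x = H (a : Int) (k : Int))) := by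
    intro H
    constructor
    · rintro ⟨a, ha, k, hk, hc, hx⟩
      rw [hlen] at ha
      rw [take_getD m fila a ha (by omega)] at hk hc
      exact ⟨a, ha, k, hk, hc, by rw [zero_add] at hx; exact hx⟩
    · rintro ⟨a, ha, k, hk, hc, hx⟩
      rw [← take_getD m fila a ha (by omega)] at hk hc
      exact ⟨a, by omega, k, hk, hc, by rw [zero_add]; exact hx⟩
  unfold scanSets
  rw [outerTriple (m.take fila) 0 ([], [], [])]
  refine ⟨?_, ?_, ?_⟩
  · rw [memOuterFold (fun _ k => k) (m.take fila) 0 [] x]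
    simp only [List.mem_nil_iff, false_or]
    exact conv (fun _ k => k)
  · rw [memOuterFold (fun iv k => iv + k) (m.take fila) 0 [] x]
    simp only [List.mem_nil_iff, false_or]
    exact conv (fun iv k => iv + k)
  · rw [memOuterFold (fun iv k => iv - k) (m.take fila) 0 [] x]
    simp only [List.mem_nil_iff, false_or]
    exact conv (fun iv k => iv - k)

theorem alt_cond_iff (m : List (List Int)) (fila col : Nat)
    (hsq : ∀ row ∈ m, row.length = m.length) (hfila : fila ≤ m.length) :
    ((!(PySem.Set.contains (scanSets (m.take fila)).1 (col : Int))
        && !(PySem.Set.contains (scanSets (m.take fila)).2.1 ((fila : Int) + (col : Int)))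
        && !(PySem.Set.contains (scanSets (m.take fila)).2.2 ((fila : Int) - (col : Int)))) = true) ↔
      ¬ ColHit m fila col ∧ ¬ AntiHit m fila col ∧ ¬ DiagHit m fila col := by
  have hsq' : ∀ i, i < m.length → (m.getD i []).length = m.length := by
    intro i hi
    rw [List.getD_eq_getElem _ _ hi]
    exact hsq _ (List.getElem_mem hi)
  have h1 : ((col : Int) ∈ (scanSets (m.take fila)).1) ↔ ColHit m fila col := by
    rw [(mem_scanSets m fila hfila (col : Int)).1]
    constructor
    · rintro ⟨a, ha, k, hk, hc, hx⟩
      refine ⟨a, ha, k, ?_, hc, hx.symm⟩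
      rw [hsq' a (by omega)] at hk
      exact hk
    · rintro ⟨i, hi, j, hj, hc, hx⟩
      refine ⟨i, hi, j, ?_, hc, hx.symm⟩
      rw [hsq' i (by omega)]
      exact hj
  have h2 : (((fila : Int) + (col : Int)) ∈ (scanSets (m.take fila)).2.1) ↔ AntiHit m fila col := by
    rw [(mem_scanSets m fila hfila _).2.1]
    constructor
    · rintro ⟨a, ha, k, hk, hc, hx⟩
      refine ⟨a, ha, k, ?_, hc, hx.symm⟩
      rw [hsq' a (by omega)] at hk
      exact hk
    · rintro ⟨i, hi, j, hj, hc, hx⟩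
      refine ⟨i, hi, j, ?_, hc, hx.symm⟩
      rw [hsq' i (by omega)]
      exact hj
  have h3 : (((fila : Int) - (col : Int)) ∈ (scanSets (m.take fila)).2.2) ↔ DiagHit m fila col := by
    rw [(mem_scanSets m fila hfila _).2.2]
    constructor
    · rintro ⟨a, ha, k, hk, hc, hx⟩
      refine ⟨a, ha, k, ?_, hc, hx.symm⟩
      rw [hsq' a (by omega)] at hk
      exact hk
    · rintro ⟨i, hi, j, hj, hc, hx⟩
      refine ⟨i, hi, j, ?_, hc, hx.symm⟩
      rw [hsq' i (by omega)]
      exact hj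
  have hb : ∀ (s : PySem.Set Int) (y : Int), ((!(PySem.Set.contains s y)) = true) ↔ ¬ (y ∈ s) := by
    intro s y
    rw [Bool.not_eq_true', ← Bool.not_eq_true, PySem.Set.contains_iff]
  rw [Bool.and_eq_true, Bool.and_eq_true, hb, hb, hb, h1, h2, h3, and_assoc]

-- ===== VERDICT (by name: the statement is the Claim_ definition above) =====
theorem obtener_hijos_spec : Claim_equal_obtener_hijos := by
  intro matriz _hdom hpre
  unfold Spec_obtener_hijos
  have hfind : (List.range matriz.length).find?
      (fun i => !((matriz.getD i []).contains (1 : Int)))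
      = matriz.findIdx? (fun row => !(row.contains (1 : Int))) :=
    findRange (fun row => !(row.contains (1 : Int))) matriz
  simp only [obtener_hijos, obtener_hijos_alt]
  rw [hfind]
  cases hfi : matriz.findIdx? (fun row => !(row.contains (1 : Int))) with
  | none => simp
  | some fila =>
    obtain ⟨hlt, hpred, -⟩ := List.findIdx?_eq_some_iff_getElem.mp hfi
    have hsq : ∀ row ∈ matriz, row.length = matriz.length := by
      rcases hpre with h | h
      · exact h
      · exfalso
        have : matriz.findIdx? (fun row => !(row.contains (1 : Int))) = none := by
          rw [List.findIdx?_eq_none_iff]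
          intro row hrow
          simp [h row hrow]
        rw [hfi] at this
        cases this
    have hne : (((fila : Nat) : Int) == (-1 : Int)) = false := by
      rw [beq_eq_false_iff_ne]
      omega
    rw [hne]
    simp only [Bool.false_eq_true, if_false, Int.toNat_natCast]
    rw [PySem.List.foldl_append_if
      (fun col => es_valida matriz fila col)
      (fun col => (copiarMatriz matriz).set fila
        (((copiarMatriz matriz).getD fila []).set col (1 : Int)))
      ((List.range matriz.length).reverse) []]
    rw [filterMap_if ((List.range matriz.length).reverse)
      (fun col => (!(PySem.Set.contains (scanSets (matriz.take fila)).1 (col : Int))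
          && !(PySem.Set.contains (scanSets (matriz.take fila)).2.1 ((fila : Int) + (col : Int)))
          && !(PySem.Set.contains (scanSets (matriz.take fila)).2.2 ((fila : Int) - (col : Int)))))
      (fun col => matriz.set fila ((matriz.getD fila []).set col (1 : Int)))]
    rw [copiar_eq matriz hsq, List.nil_append]
    congr 1
    apply List.filter_congr
    intro col hcol
    rw [List.mem_reverse, List.mem_range] at hcol
    rw [Bool.eq_iff_iff]
    rw [es_valida_iff matriz fila col hcol, alt_cond_iff matriz fila col hsq (by omega)]
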